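-- pv_equiv track=rewrite | github.com/wilmurillo-ai/Design-Assistant | .skills/openclaw-skills/skills/seanmwx/fund-buying-decision/scripts/import_eastmoney_pingzhongdata.py | normalize_js_keywords
-- ===== SOURCE A (Python) =====
-- def normalize_js_keywords(raw_value: str) -> str:
--     output: list[str] = []
--     quote: str | None = None
--     escaped = False
--     index = 0
--
--     while index < len(raw_value):
--         char = raw_value[index]
--
--         if quote is not None:
--             output.append(char)
--             if escaped:
--                 escaped = False
--             elif char == "\\":
--                 escaped = True
--             elif char == quote:
--                 quote = None
--             index += 1
--             continue
--
--         if char in ("'", '"'):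
--             quote = char
--             output.append(char)
--             index += 1
--             continue
--
--         if char.isalpha() or char == "_":
--             end_index = index + 1
--             while end_index < len(raw_value) and (
--                 raw_value[end_index].isalnum() or raw_value[end_index] == "_"
--             ):
--                 end_index += 1
--             token = raw_value[index:end_index]
--             output.append(
--                 {
--                     "true": "True",
--                     "false": "False",
--                     "null": "None",
--                     "undefined": "None",
--                     "NaN": "None",
--                 }.get(token, token)
--             )
--             index = end_index
--             continue
--
--         output.append(char)
--         index += 1
--
--     return "".join(output)
-- ===== SOURCE B (Python) =====
-- _JS_TO_PY = {
--     "true": "True",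
--     "false": "False",
--     "null": "None",
--     "undefined": "None",
--     "NaN": "None",
-- }
--
--
-- def normalize_js_keywords(raw_value: str) -> str:
--     # Segment-based scanner: copies whole string literals as slices (skipping
--     # two chars on a backslash) and whole identifier tokens, instead of a
--     # per-character state machine with quote/escaped flags.
--     n = len(raw_value)
--     parts = []
--     i = 0
--     while i < n:
--         c = raw_value[i]
--         if c == "'" or c == '"':
--             j = i + 1
--             while j < n:
--                 if raw_value[j] == "\\":
--                     j += 2
--                 elif raw_value[j] == c:
--                     j += 1
--                     break
--                 else:
--                     j += 1
--             j = min(j, n)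
--             parts.append(raw_value[i:j])
--             i = j
--         elif c.isalpha() or c == "_":
--             j = i + 1
--             while j < n and (raw_value[j].isalnum() or raw_value[j] == "_"):
--                 j += 1
--             token = raw_value[i:j]
--             parts.append(_JS_TO_PY.get(token, token))
--             i = j
--         else:
--             parts.append(c)
--             i += 1
--     return "".join(parts)
-- ===== Notes on version B (the rewrite author's own statement) =====
-- stated objective: simpler
-- what changed: Replaced A's per-character state machine (quote/escaped flags, output appended one char at a time) by a segment scanner that slices out whole string literals (advancing two positions on a backslash, no escaped flag) and whole identifier tokens.
import Mathlib
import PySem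

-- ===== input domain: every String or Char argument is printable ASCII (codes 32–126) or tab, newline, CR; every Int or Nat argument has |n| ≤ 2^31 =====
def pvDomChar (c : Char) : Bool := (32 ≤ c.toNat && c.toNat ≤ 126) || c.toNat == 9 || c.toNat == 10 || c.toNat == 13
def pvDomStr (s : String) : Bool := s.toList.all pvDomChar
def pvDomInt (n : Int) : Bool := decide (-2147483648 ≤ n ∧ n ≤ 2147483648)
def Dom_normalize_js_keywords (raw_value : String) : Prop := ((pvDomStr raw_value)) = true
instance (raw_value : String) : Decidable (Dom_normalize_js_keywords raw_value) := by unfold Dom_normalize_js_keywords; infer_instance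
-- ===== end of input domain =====

-- B replaces A's per-character quote/escape state machine by a segment scanner that
-- copies whole string literals (skipping two chars on a backslash) and whole tokens;
-- objective: simpler (return-value equivalence; neither version mutates anything).

-- shared helpers, identical in both Pythons: the literal keyword dict's .get(token, token)
-- and Python's identifier character tests (PySem char-level isalpha/isalnum)
def pvKw (tok : List Char) : List Char :=
  if tok = "true".toList then "True".toList
  else if tok = "false".toList then "False".toList
  else if tok = "null".toList then "None".toList
  else if tok = "undefined".toList then "None".toList
  else if tok = "NaN".toList then "None".toList
  else tok

def pvIsIdStart (c : Char) : Bool := PySem.Chars.isalpha c || c == '_'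
def pvIsIdCont (c : Char) : Bool := PySem.Chars.isalnum c || c == '_'

-- ===== PORT A =====
-- A's while loop over the index, carried as structural state (remaining chars,
-- current quote, escaped flag); the inner identifier while-loop is takeWhile/dropWhile;
-- the output list of strings is a List (List Char), the final ''.join a flatten (exact:
-- joining with the empty separator is concatenation).
def pvLoopA : List Char → Option Char → Bool → List (List Char)
  | [], _, _ => []
  | c :: rest, some q, escaped =>
    [c] ::
      (if escaped then pvLoopA rest (some q) false
       else if c == '\\' then pvLoopA rest (some q) true
       else if c == q then pvLoopA rest none false
       else pvLoopA rest (some q) false)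
  | c :: rest, none, _ =>
    if c == '\'' || c == '"' then
      [c] :: pvLoopA rest (some c) false
    else if pvIsIdStart c then
      pvKw (c :: rest.takeWhile pvIsIdCont) :: pvLoopA (rest.dropWhile pvIsIdCont) none false
    else
      [c] :: pvLoopA rest none false
termination_by cs _ _ => cs.length
decreasing_by
  all_goals first
    | (simp only [List.length_cons]; omega)
    | (have h := List.length_dropWhile_le pvIsIdCont rest
       simp only [List.length_cons]; omega)

def normalize_js_keywords (raw_value : String) : String :=
  String.ofList (pvLoopA raw_value.toList none false).flatten

-- ===== PORT B =====
-- Source B's inner string-literal while loop: the consumed slice raw_value[i:j] and the rest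
def pvScanStr (q : Char) : List Char → List Char × List Char
  | [] => ([], [])
  | c :: rest =>
    if c == '\\' then
      match rest with
      | [] => ([c], [])
      | d :: rest' =>
        let p := pvScanStr q rest'
        (c :: d :: p.1, p.2)
    else if c == q then ([c], rest)
    else
      let p := pvScanStr q rest
      (c :: p.1, p.2)
termination_by cs => cs.length
decreasing_by all_goals (simp only [List.length_cons]; omega)

-- needed by pvLoopB's termination: unfold equations for the scanner, then
-- the scanner's rest is no longer than its input
theorem pvScanStr_nil (q : Char) : pvScanStr q [] = ([], []) := by
  simp only [pvScanStr.eq_def]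

theorem pvScanStr_bs_nil (q c : Char) (hb : (c == '\\') = true) :
    pvScanStr q [c] = ([c], []) := by
  simp only [pvScanStr.eq_def]
  simp [hb]

theorem pvScanStr_bs_cons (q c d : Char) (rest' : List Char) (hb : (c == '\\') = true) :
    pvScanStr q (c :: d :: rest') = (c :: d :: (pvScanStr q rest').1, (pvScanStr q rest').2) := by
  conv_lhs => rw [pvScanStr.eq_def]
  simp [hb]

theorem pvScanStr_close (q c : Char) (rest : List Char)
    (hb : ¬ (c == '\\') = true) (hq : (c == q) = true) :
    pvScanStr q (c :: rest) = ([c], rest) := by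
  conv_lhs => rw [pvScanStr.eq_def]
  simp [hb, hq]

theorem pvScanStr_other (q c : Char) (rest : List Char)
    (hb : ¬ (c == '\\') = true) (hq : ¬ (c == q) = true) :
    pvScanStr q (c :: rest) = (c :: (pvScanStr q rest).1, (pvScanStr q rest).2) := by
  conv_lhs => rw [pvScanStr.eq_def]
  simp [hb, hq]

theorem pvScanStr_snd_length : ∀ (n : Nat) (q : Char) (cs : List Char), cs.length ≤ n →
    (pvScanStr q cs).2.length ≤ cs.length := by
  intro n
  induction n with
  | zero =>
    intro q cs h
    match cs with
    | [] => simp [pvScanStr_nil]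
    | c :: rest => simp at h
  | succ n ih =>
    intro q cs h
    match cs with
    | [] => simp [pvScanStr_nil]
    | c :: rest =>
      by_cases hb : (c == '\\') = true
      · match rest with
        | [] => simp [pvScanStr_bs_nil q c hb]
        | d :: rest' =>
          have := ih q rest' (by simp at h; omega)
          rw [pvScanStr_bs_cons q c d rest' hb]
          simp only [List.length_cons]
          omega
      · by_cases hq : (c == q) = true
        · simp [pvScanStr_close q c rest hb hq]
        · have := ih q rest (by simp at h; omega)
          rw [pvScanStr_other q c rest hb hq]
          simp only [List.length_cons]
          omega

def pvLoopB : List Char → List (List Char)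
  | [] => []
  | c :: rest =>
    if c == '\'' || c == '"' then
      let p := pvScanStr c rest
      (c :: p.1) :: pvLoopB p.2
    else if pvIsIdStart c then
      let p := rest.span pvIsIdCont
      pvKw (c :: p.1) :: pvLoopB p.2
    else
      [c] :: pvLoopB rest
termination_by cs => cs.length
decreasing_by
  · have h := pvScanStr_snd_length rest.length c rest le_rfl
    simp only [List.length_cons]; omega
  · have h := List.length_dropWhile_le pvIsIdCont rest
    simp only [List.span_eq_takeWhile_dropWhile, List.length_cons]; omega
  · simp only [List.length_cons]; omega

def normalize_js_keywords_alt (raw_value : String) : String :=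
  String.ofList (pvLoopB raw_value.toList).flatten

-- ===== PRECONDITION & SPEC =====
def Spec_normalize_js_keywords (raw_value : String) (out : String) : Prop := out = normalize_js_keywords_alt raw_value
instance (raw_value : String) (out : String) : Decidable (Spec_normalize_js_keywords raw_value out) := by unfold Spec_normalize_js_keywords; infer_instance

-- ===== CLAIM (what is proved, stated in full; the proofs are below) =====
def Claim_equal_normalize_js_keywords : Prop := ∀ (raw_value : String), Dom_normalize_js_keywords raw_value → Spec_normalize_js_keywords raw_value (normalize_js_keywords raw_value)

-- ===== LEMMAS AND PROOFS =====

-- unfold equations for the two loops (their WF-recursion equations, specialised per branch)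
theorem pvLoopA_nil (q : Option Char) (e : Bool) : pvLoopA [] q e = [] := by
  simp only [pvLoopA.eq_def]

theorem pvLoopA_cons_some (c q : Char) (rest : List Char) (e : Bool) :
    pvLoopA (c :: rest) (some q) e =
      [c] :: (if e then pvLoopA rest (some q) false
              else if c == '\\' then pvLoopA rest (some q) true
              else if c == q then pvLoopA rest none false
              else pvLoopA rest (some q) false) := by
  conv_lhs => rw [pvLoopA.eq_def]

theorem pvLoopA_cons_none (c : Char) (rest : List Char) (e : Bool) :
    pvLoopA (c :: rest) none e =
      if c == '\'' || c == '"' then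
        [c] :: pvLoopA rest (some c) false
      else if pvIsIdStart c then
        pvKw (c :: rest.takeWhile pvIsIdCont) :: pvLoopA (rest.dropWhile pvIsIdCont) none false
      else
        [c] :: pvLoopA rest none false := by
  conv_lhs => rw [pvLoopA.eq_def]

theorem pvLoopB_nil : pvLoopB [] = [] := by
  simp only [pvLoopB.eq_def]

theorem pvLoopB_cons (c : Char) (rest : List Char) :
    pvLoopB (c :: rest) =
      if c == '\'' || c == '"' then
        (c :: (pvScanStr c rest).1) :: pvLoopB (pvScanStr c rest).2
      else if pvIsIdStart c then
        pvKw (c :: (rest.span pvIsIdCont).1) :: pvLoopB (rest.span pvIsIdCont).2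
      else
        [c] :: pvLoopB rest := by
  conv_lhs => rw [pvLoopB.eq_def]

-- A's in-string state machine emits exactly the characters B's scanner consumes,
-- one singleton each, then both continue outside a string on the same rest.
theorem pvLoopA_string_mode : ∀ (n : Nat) (q : Char) (cs : List Char), cs.length ≤ n →
    pvLoopA cs (some q) false =
      ((pvScanStr q cs).1.map (fun c => [c])) ++ pvLoopA (pvScanStr q cs).2 none false := by
  intro n
  induction n with
  | zero =>
    intro q cs h
    match cs with
    | [] => simp [pvScanStr_nil, pvLoopA_nil]
    | c :: rest => simp at h
  | succ n ih =>
    intro q cs h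
    match cs with
    | [] => simp [pvScanStr_nil, pvLoopA_nil]
    | c :: rest =>
      by_cases hb : (c == '\\') = true
      · match rest with
        | [] =>
          rw [pvScanStr_bs_nil q c hb, pvLoopA_cons_some]
          simp [hb, pvLoopA_nil]
        | d :: rest' =>
          have hdq := ih q rest' (by simp at h; omega)
          rw [pvScanStr_bs_cons q c d rest' hb, pvLoopA_cons_some]
          simp only [Bool.false_eq_true, if_false, hb, if_true]
          rw [pvLoopA_cons_some d q rest' true]
          simp [hdq]
      · by_cases hq : (c == q) = true
        · rw [pvScanStr_close q c rest hb hq, pvLoopA_cons_some]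
          simp [hb, hq]
        · have hrec := ih q rest (by simp at h; omega)
          rw [pvScanStr_other q c rest hb hq, pvLoopA_cons_some]
          simp only [Bool.false_eq_true, if_false, hb, hq]
          simp [hrec]

theorem pvFlatten_singletons (l : List Char) : (l.map (fun c => [c])).flatten = l := by
  induction l with
  | nil => rfl
  | cons c t ih => simp [ih]

theorem pvMain : ∀ (n : Nat) (cs : List Char), cs.length ≤ n →
    (pvLoopA cs none false).flatten = (pvLoopB cs).flatten := by
  intro n
  induction n with
  | zero =>
    intro cs h
    match cs with
    | [] => simp [pvLoopA_nil, pvLoopB_nil]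
    | c :: rest => simp at h
  | succ n ih =>
    intro cs h
    match cs with
    | [] => simp [pvLoopA_nil, pvLoopB_nil]
    | c :: rest =>
      rw [pvLoopA_cons_none, pvLoopB_cons]
      by_cases hquote : (c == '\'' || c == '"') = true
      · have hs := pvScanStr_snd_length rest.length c rest le_rfl
        have hrec := ih (pvScanStr c rest).2 (by simp at h; omega)
        simp only [hquote, if_true]
        rw [pvLoopA_string_mode rest.length c rest le_rfl]
        simp [pvFlatten_singletons, hrec]
      · by_cases hid : pvIsIdStart c = true
        · have hd := List.length_dropWhile_le pvIsIdCont rest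
          have hrec := ih (rest.dropWhile pvIsIdCont) (by simp at h; omega)
          simp only [hquote, Bool.false_eq_true, if_false, hid, if_true,
            List.span_eq_takeWhile_dropWhile]
          simp [hrec]
        · have hrec := ih rest (by simp at h; omega)
          simp only [hquote, hid, Bool.false_eq_true, if_false]
          simp [hrec]

-- ===== VERDICT (by name: the statement is the Claim_ definition above) =====
theorem normalize_js_keywords_spec : Claim_equal_normalize_js_keywords := by
  intro s _
  unfold Spec_normalize_js_keywords normalize_js_keywords normalize_js_keywords_alt
  rw [pvMain s.toList.length s.toList le_rfl]
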